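-- pv_equiv track=rewrite | github.com/PrinceTrambadiya/apriori_project | main.py | dataSorting
-- ===== SOURCE A (Python) =====
-- def dataSorting(iteamSets, sizeOfItemSets):
--     retList = []
--     lenLk = len(iteamSets)
--     for i in range(lenLk):
--         for j in range(i + 1, lenLk):
--             tempList1 = list(iteamSets[i])[:sizeOfItemSets - 2]
--             tempList2 = list(iteamSets[j])[:sizeOfItemSets - 2]
--             tempList1.sort()
--             tempList2.sort()
--             if tempList1 == tempList2:
--                 retList.append(iteamSets[i] | iteamSets[j])
--     return retList
-- ===== SOURCE B (Python) =====
-- def dataSorting(iteamSets, sizeOfItemSets):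
--     cut = sizeOfItemSets - 2
--     keys = [tuple(sorted(list(s)[:cut])) for s in iteamSets]
--     groups = {}
--     for k, (i, s) in zip(keys, enumerate(iteamSets)):
--         groups.setdefault(k, []).append((i, s))
--     ret = []
--     for k, (i, s) in zip(keys, enumerate(iteamSets)):
--         for j, t in groups[k]:
--             if i < j:
--                 ret.append(s | t)
--     return ret
-- ===== Notes on version B (the rewrite author's own statement) =====
-- stated objective: faster
-- what changed: B computes each itemset's sorted (k-2)-prefix key once, groups entries by key in a dict, and emits unions only for later entries of the same group, instead of A's all-pairs scan that re-slices and re-sorts both itemsets for every pair.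
import Mathlib
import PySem

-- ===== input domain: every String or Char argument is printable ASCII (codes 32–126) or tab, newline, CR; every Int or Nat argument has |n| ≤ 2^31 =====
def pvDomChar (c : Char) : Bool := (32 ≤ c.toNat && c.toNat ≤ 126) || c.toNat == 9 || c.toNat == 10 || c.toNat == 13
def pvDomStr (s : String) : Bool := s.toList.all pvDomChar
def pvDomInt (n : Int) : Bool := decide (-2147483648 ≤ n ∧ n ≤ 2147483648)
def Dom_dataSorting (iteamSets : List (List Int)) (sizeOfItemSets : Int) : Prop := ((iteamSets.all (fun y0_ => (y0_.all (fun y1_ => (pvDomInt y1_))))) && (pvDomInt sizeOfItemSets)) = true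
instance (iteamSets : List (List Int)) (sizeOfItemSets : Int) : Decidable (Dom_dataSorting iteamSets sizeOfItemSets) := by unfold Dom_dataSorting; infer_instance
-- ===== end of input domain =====

-- B replaces A's all-pairs rescan (re-sorting both prefixes for every pair) by computing each
-- sorted-prefix key once, grouping entries by key in a dict, and joining only within groups in
-- the same (i, j) order: one sort per itemset instead of one per pair.


-- ===== PORT A =====
def dataSorting (iteamSets : List (List Int)) (sizeOfItemSets : Int) : List (List Int) :=
  let lenLk : Int := iteamSets.length
  (PySem.List.pyRange 0 lenLk).foldl (fun retList i =>
    (PySem.List.pyRange (i + 1) lenLk).foldl (fun retList j =>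
      let tempList1 := PySem.List.sorted
        (PySem.List.slice (PySem.List.pyGetD iteamSets i []) none (some (sizeOfItemSets - 2)))
        (fun x => x) false
      let tempList2 := PySem.List.sorted
        (PySem.List.slice (PySem.List.pyGetD iteamSets j []) none (some (sizeOfItemSets - 2)))
        (fun x => x) false
      if tempList1 = tempList2 then
        retList ++ [PySem.Set.union (PySem.List.pyGetD iteamSets i []) (PySem.List.pyGetD iteamSets j [])]
      else retList) retList) []

-- ===== PORT B =====
def dataSorting_alt (iteamSets : List (List Int)) (sizeOfItemSets : Int) : List (List Int) :=
  let cut := sizeOfItemSets - 2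
  let keys := iteamSets.map (fun s =>
    PySem.List.sorted (PySem.List.slice s none (some cut)) (fun x => x) false)
  let groups := (keys.zip (PySem.List.enumerate iteamSets)).foldl
    (fun d p => d.modify p.1 [] (fun g => g ++ [p.2])) PySem.Dict.empty
  (keys.zip (PySem.List.enumerate iteamSets)).foldl (fun ret p =>
    (groups.getD p.1 []).foldl (fun ret q =>
      if p.2.1 < q.1 then ret ++ [PySem.Set.union p.2.2 q.2] else ret) ret) []

-- ===== PRECONDITION & SPEC =====
def Spec_dataSorting (iteamSets : List (List Int)) (sizeOfItemSets : Int) (out : List (List Int)) : Prop := out = dataSorting_alt iteamSets sizeOfItemSets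
instance (iteamSets : List (List Int)) (sizeOfItemSets : Int) (out : List (List Int)) : Decidable (Spec_dataSorting iteamSets sizeOfItemSets out) := by unfold Spec_dataSorting; infer_instance

-- ===== CLAIM (what is proved, stated in full; the proofs are below) =====
def Claim_equal_dataSorting : Prop := ∀ (iteamSets : List (List Int)) (sizeOfItemSets : Int), Dom_dataSorting iteamSets sizeOfItemSets → Spec_dataSorting iteamSets sizeOfItemSets (dataSorting iteamSets sizeOfItemSets)

-- ===== LEMMAS AND PROOFS =====

-- pyRange between two Nat casts is a mapped List.range'
lemma pvPyRange_natCast (a n : Nat) : PySem.List.pyRange (a:Int) (n:Int)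
    = (List.range' a (n - a)).map (fun k => (k:Int)) := by
  induction hk : n - a generalizing a with
  | zero =>
      have h1 : PySem.List.pyRange (a:Int) (n:Int) = [] := by
        rw [List.eq_nil_iff_forall_not_mem]
        intro x hx
        rw [PySem.List.mem_pyRange_one] at hx
        omega
      simp [h1]
  | succ k ih =>
      have ha : (a:Int) < n := by exact_mod_cast by omega
      rw [PySem.List.pyRange_one_cons ha]
      have : (a:Int) + 1 = ((a+1 : Nat) : Int) := by push_cast; ring
      rw [this, ih (a+1) (by omega), List.range'_succ]
      simp

lemma pvRangeFilt (a n : Nat) : (List.range n).filter (fun k => decide (a < k))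
    = List.range' (a+1) (n - (a+1)) := by
  induction n with
  | zero => simp
  | succ n ih =>
      rw [List.range_succ, List.filter_append, ih]
      by_cases h : a < n
      · have h2 : n - (a+1) + 1 = n + 1 - (a+1) := by omega
        have h3 : a + 1 + (n - (a+1)) = n := by omega
        simp [h, ← h2, List.range'_concat, h3]
      · have h2 : n - (a+1) = 0 := by omega
        have h3 : n + 1 - (a+1) = 0 := by omega
        simp [h, h2, h3]

-- A's inner range(i+1, n) is range(0, n) restricted to the later indices
lemma pvRange_filter (a n : Nat) : PySem.List.pyRange ((a:Int) + 1) (n:Int)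
    = (PySem.List.pyRange 0 (n:Int)).filter (fun j => decide ((a:Int) < j)) := by
  have h1 : (a:Int) + 1 = ((a+1 : Nat) : Int) := by push_cast; ring
  rw [h1, pvPyRange_natCast, PySem.List.pyRange_zero_natCast, List.filter_map]
  have h2 : ((fun j => decide ((a:Int) < j)) ∘ fun (k:Nat) => (k:Int)) = fun k => decide (a < k) := by
    funext k; simp
  rw [h2, pvRangeFilt]
  generalize List.range' (a+1) (n-(a+1)) = l
  induction l with
  | nil => simp
  | cons x xs ih => simpa using ih

-- zip(keys, enumerate(xs)) tags each enumerated entry with its key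
lemma pvZip {K : List Int → List Int} (xs : List (List Int)) (s : Int) :
    (xs.map K).zip (PySem.List.enumerate xs s)
      = (PySem.List.enumerate xs s).map (fun p => (K p.2, p)) := by
  induction xs generalizing s with
  | nil => simp [PySem.List.enumerate_nil]
  | cons x xs ih => simp [PySem.List.enumerate_cons, ih]

-- "for p in L: for q in G p: if c p q: out.append(u p q)" is a flatMap of filtered maps
lemma pvDoubleLoop {α β γ : Type} (G : α → List β) (c : α → β → Prop)
    [inst : ∀ p q, Decidable (c p q)] (u : α → β → γ) (L : List α) (acc : List γ) :
    L.foldl (fun ret p => (G p).foldl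
      (fun ret q => if c p q then ret ++ [u p q] else ret) ret) acc
    = acc ++ L.flatMap (fun p => ((G p).filter (fun q => decide (c p q))).map (u p)) := by
  have h : ∀ (p : α) (q : β) (ret : List γ),
      (if c p q then ret ++ [u p q] else ret)
        = (if decide (c p q) = true then ret ++ [u p q] else ret) := by
    intro p q ret; simp
  simp only [h, PySem.List.foldl_append_if, PySem.List.foldl_append_eq_flatMap]

lemma pvMain (xs : List (List Int)) (m : Int) : dataSorting xs m = dataSorting_alt xs m := by
  simp only [dataSorting, dataSorting_alt, pvZip]
  rw [pvDoubleLoop (c := fun i j => PySem.List.sorted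
        (PySem.List.slice (PySem.List.pyGetD xs i []) none (some (m - 2))) (fun x => x) false
      = PySem.List.sorted
        (PySem.List.slice (PySem.List.pyGetD xs j []) none (some (m - 2))) (fun x => x) false)]
  have hB : ∀ (L : List (List Int × (Int × List Int))) (d : PySem.Dict (List Int) (List (Int × List Int))),
      L.foldl (fun ret p => (d.getD p.1 []).foldl
        (fun ret q => if p.2.1 < q.1 then ret ++ [PySem.Set.union p.2.2 q.2] else ret) ret) []
      = L.flatMap (fun p => ((d.getD p.1 []).filter (fun q => decide (p.2.1 < q.1))).map
          (fun q => PySem.Set.union p.2.2 q.2)) := by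
    intro L d
    simpa using pvDoubleLoop (G := fun p => d.getD p.1 [])
      (c := fun p q => p.2.1 < q.1) (u := fun p q => PySem.Set.union p.2.2 q.2) L []
  rw [hB]
  simp only [PySem.Dict.getD_foldl_modify_append, PySem.Dict.getD_empty, List.nil_append,
    List.filter_map, List.flatMap_map, List.map_map,
    PySem.List.enumerate_eq_map_pyRange _ ([] : List Int),
    PySem.List.pyRange_zero_natCast, pvRange_filter, List.filter_filter, Function.comp,
    PySem.List.len]
  refine congrArg₂ _ (funext fun a => ?_) rfl
  refine congrArg₂ _ (funext fun b => rfl) ?_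
  refine List.filter_congr ?_
  intro b hb
  have hbeq : ((PySem.List.sorted (PySem.List.slice (PySem.List.pyGetD xs ↑b []) none (some (m - 2))) (fun x => x) false) ==
      (PySem.List.sorted (PySem.List.slice (PySem.List.pyGetD xs ↑a []) none (some (m - 2))) (fun x => x) false))
      = decide ((PySem.List.sorted (PySem.List.slice (PySem.List.pyGetD xs ↑a []) none (some (m - 2))) (fun x => x) false) =
      (PySem.List.sorted (PySem.List.slice (PySem.List.pyGetD xs ↑b []) none (some (m - 2))) (fun x => x) false)) := by
    simp only [Bool.beq_eq_decide_eq]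
    exact decide_eq_decide.mpr ⟨Eq.symm, Eq.symm⟩
  rw [hbeq, Bool.and_comm]
  rfl

-- ===== VERDICT (by name: the statement is the Claim_ definition above) =====
theorem dataSorting_spec : Claim_equal_dataSorting := by
  intro iteamSets sizeOfItemSets _
  exact pvMain iteamSets sizeOfItemSets
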